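-- pv_equiv track=rewrite | github.com/mihail-nikolov/hackBG | week0/simple_problems/24_int_prime_fact.py | ret_arr
-- ===== SOURCE A (Python) =====
-- def is_prime(x):
--     if x > 1:
--         if x == 2 or x == 3:
--             return True
--         else:
--             for i in range(2, x - 1):
--                 if x % i == 0:
--                     return False
--             return True
--     else:
--         return False
--
-- def ret_arr(n):
--     if is_prime(n) is True:
--         arr = [n, 1]
--         return arr
--     else:
--         for c in range(2, n+1):
--             for d in range(1, n+1):
--                 if c ** d == n and (is_prime(c) is True) and (is_prime(d) is True):
--                     arr = [c, d]
--                     return arr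
-- ===== SOURCE B (Python) =====
-- def _is_prime(x):
--     if x < 2:
--         return False
--     i = 2
--     while i * i <= x:
--         if x % i == 0:
--             return False
--         i += 1
--     return True
--
--
-- def ret_arr(n):
--     if n < 2:
--         return None
--     # smallest divisor >= 2 (trial division up to sqrt(n)); p stays n iff n is prime
--     p = n
--     f = 2
--     while f * f <= n:
--         if n % f == 0:
--             p = f
--             break
--         f += 1
--     if p == n:
--         return [n, 1]
--     # extract the multiplicity of p in n
--     m, k = n, 0
--     while m % p == 0 and m > 1:
--         m //= p
--         k += 1
--     if m == 1 and _is_prime(k):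
--         return [p, k]
--     return None
-- ===== Notes on version B (the rewrite author's own statement) =====
-- stated objective: faster
-- what changed: Replaced A's brute-force scan over all candidate pairs (c, d) up to n (each tested with a linear-time primality check and a big-integer power c**d) by trial-division factorisation: find the smallest prime factor p of n up to sqrt(n), extract its multiplicity k by repeated division, and return [p, k] exactly when n = p^k with k prime.
import Mathlib
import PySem

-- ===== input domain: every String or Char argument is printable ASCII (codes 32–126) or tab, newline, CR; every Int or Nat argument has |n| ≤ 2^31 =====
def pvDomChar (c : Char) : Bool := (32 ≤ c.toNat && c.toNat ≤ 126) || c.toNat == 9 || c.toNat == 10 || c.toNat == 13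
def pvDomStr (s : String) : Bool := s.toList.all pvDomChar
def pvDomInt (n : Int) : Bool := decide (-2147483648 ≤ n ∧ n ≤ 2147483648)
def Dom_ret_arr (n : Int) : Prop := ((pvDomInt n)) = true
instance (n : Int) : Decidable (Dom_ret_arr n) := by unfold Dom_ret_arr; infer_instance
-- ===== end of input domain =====

-- B replaces A's brute-force search over all candidate pairs (c, d) up to n by
-- trial-division factorisation up to sqrt(n): find the smallest factor p, extract its
-- multiplicity k, and answer [p, k] exactly when n = p^k with k prime (objective: faster).

-- ===== PORT A =====
def isPrimeA (x : Int) : Bool :=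
  if x > 1 then
    if x == 2 || x == 3 then true
    else !((PySem.List.pyRange 2 (x - 1) 1).any (fun i => PySem.Int.mod x i == 0))
  else false

-- 'c ** d' has d ≥ 1 (d from range(1, n+1)); ported as c ^ d.toNat, exact for d ≥ 0
def ret_arr (n : Int) : Option (List Int) :=
  if isPrimeA n then some [n, 1]
  else
    (PySem.List.pyRange 2 (n + 1) 1).findSome? (fun c =>
      (PySem.List.pyRange 1 (n + 1) 1).findSome? (fun d =>
        if c ^ d.toNat == n && isPrimeA c && isPrimeA d then some [c, d] else none))

-- ===== PORT B =====
def primeLoopB (x : Int) (i : Int) : Bool :=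
  if i * i ≤ x then (if PySem.Int.mod x i == 0 then false else primeLoopB x (i + 1)) else true
termination_by (x + 1 - i).toNat
decreasing_by
  have key : i ≤ x := by
    rcases (by omega : 1 ≤ i ∨ i < 1) with h1 | h1
    · calc i ≤ i * i := le_mul_of_one_le_left (by omega) h1
        _ ≤ x := by assumption
    · have h0 : (0 : Int) ≤ i * i := mul_self_nonneg i
      omega
  omega

def isPrimeB (x : Int) : Bool := if x < 2 then false else primeLoopB x 2

def sfLoopB (n : Int) (f : Int) : Int :=
  if f * f ≤ n then (if PySem.Int.mod n f == 0 then f else sfLoopB n (f + 1)) else n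
termination_by (n + 1 - f).toNat
decreasing_by
  have key : f ≤ n := by
    rcases (by omega : 1 ≤ f ∨ f < 1) with h1 | h1
    · calc f ≤ f * f := le_mul_of_one_le_left (by omega) h1
        _ ≤ n := by assumption
    · have h0 : (0 : Int) ≤ f * f := mul_self_nonneg f
      omega
  omega

-- Source B's 'while m % p == 0 and m > 1' loop; the fuel argument (n.natAbs at the call
-- site) only makes the recursion structural — it is never exhausted on admitted inputs
def powCountB (p : Int) : Nat → Int → Int × Int
  | 0, m => (m, 0)
  | fuel + 1, m =>
    if PySem.Int.mod m p == 0 && m > 1 then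
      let r := powCountB p fuel (PySem.Int.floordiv m p)
      (r.1, r.2 + 1)
    else (m, 0)

def ret_arr_alt (n : Int) : Option (List Int) :=
  if n < 2 then none
  else
    let p := sfLoopB n 2
    if p == n then some [n, 1]
    else
      let r := powCountB p n.natAbs n
      if r.1 == 1 && isPrimeB r.2 then some [p, r.2] else none

-- ===== PRECONDITION & SPEC =====
def Spec_ret_arr (n : Int) (out : Option (List Int)) : Prop := out = ret_arr_alt n
instance (n : Int) (out : Option (List Int)) : Decidable (Spec_ret_arr n out) := by unfold Spec_ret_arr; infer_instance

-- ===== CLAIM (what is proved, stated in full; the proofs are below) =====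
def Claim_equal_ret_arr : Prop := ∀ (n : Int), Dom_ret_arr n → Spec_ret_arr n (ret_arr n)

-- ===== LEMMAS AND PROOFS =====

-- A's trial division over range(2, x-1) recognises exactly the primes
theorem isPrimeA_iff (x : Int) : isPrimeA x = true ↔ 2 ≤ x ∧ Nat.Prime x.toNat := by
  unfold isPrimeA
  by_cases hx : x > 1
  · simp only [hx, if_true]
    by_cases h23 : x = 2 ∨ x = 3
    · have hb : (x == 2 || x == 3) = true := by rcases h23 with h | h <;> simp [h]
      rw [hb]
      simp only [if_true, true_iff]
      rcases h23 with h | h <;> subst h <;> exact ⟨by norm_num, by decide⟩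
    · have h2 : x ≠ 2 := fun h => h23 (Or.inl h)
      have h3 : x ≠ 3 := fun h => h23 (Or.inr h)
      have hb : (x == 2 || x == 3) = false := by simp [h2, h3]
      rw [hb]
      have hx4 : 4 ≤ x := by omega
      have hN : ((x.toNat : Int)) = x := Int.toNat_of_nonneg (by omega)
      simp only [Bool.false_eq_true, if_false, Bool.not_eq_true', List.any_eq_false,
        PySem.List.mem_pyRange_one]
      constructor
      · intro h
        refine ⟨by omega, Nat.prime_def_lt'.mpr ⟨by omega, fun m hm2 hmN hdvd => ?_⟩⟩
        obtain ⟨c, hc⟩ := hdvd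
        have hc0 : c ≠ 0 := by rintro rfl; omega
        have hc1 : c ≠ 1 := by rintro rfl; omega
        have h2m : 2 * m ≤ x.toNat := by
          calc 2 * m ≤ c * m := Nat.mul_le_mul_right _ (by omega)
            _ = x.toNat := by rw [hc, Nat.mul_comm]
        have hcon := h (m : Int) ⟨by exact_mod_cast Nat.cast_le.mpr hm2, by omega⟩
        apply hcon
        rw [beq_iff_eq, PySem.Int.mod_eq_zero_iff_dvd, ← hN]
        exact_mod_cast Int.natCast_dvd_natCast.mpr ⟨c, hc⟩
      · rintro ⟨-, hp⟩ i ⟨hi2, hiu⟩ hmod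
        rw [beq_iff_eq, PySem.Int.mod_eq_zero_iff_dvd] at hmod
        have hdvd : i.toNat ∣ x.toNat := by
          rw [← Int.natCast_dvd_natCast, hN, Int.toNat_of_nonneg (by omega)]
          exact hmod
        exact Nat.prime_def_lt'.mp hp |>.2 i.toNat (by omega) (by omega) hdvd
  · simp only [hx, if_false]
    constructor
    · intro h; exact absurd h (by simp)
    · intro h; omega

-- B's trial-division loop: true iff no divisor f ≥ i with f * f ≤ x
theorem primeLoopB_iff (x i : Int) (hi : 0 ≤ i) :
    primeLoopB x i = true ↔ ∀ f : Int, i ≤ f → f * f ≤ x → ¬ f ∣ x := by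
  induction i using primeLoopB.induct (x := x) with
  | case1 i hguard hmod =>
    rw [primeLoopB, if_pos hguard, if_pos hmod]
    simp only [Bool.false_eq_true, false_iff]
    intro h
    rw [beq_iff_eq, PySem.Int.mod_eq_zero_iff_dvd] at hmod
    exact h i le_rfl hguard hmod
  | case2 i hguard hmod ih =>
    rw [primeLoopB, if_pos hguard, if_neg hmod]
    rw [ih (by omega)]
    constructor
    · intro h f hf hfx
      rcases (by omega : i + 1 ≤ f ∨ f = i) with h' | h'
      · exact h f h' hfx
      · subst h'
        intro hdvd
        rw [beq_iff_eq, PySem.Int.mod_eq_zero_iff_dvd] at hmod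
        exact hmod hdvd
    · intro h f hf hfx
      exact h f (by omega) hfx
  | case3 i hguard =>
    rw [primeLoopB, if_neg hguard]
    simp only [true_iff]
    intro f hf hfx
    have : i * i ≤ f * f := mul_le_mul hf hf hi (by omega)
    omega

-- B's sqrt-bounded trial division recognises exactly the primes
theorem isPrimeB_iff (x : Int) : isPrimeB x = true ↔ 2 ≤ x ∧ Nat.Prime x.toNat := by
  unfold isPrimeB
  by_cases hx : x < 2
  · simp only [hx, if_true]
    constructor
    · intro h; exact absurd h (by simp)
    · intro h; omega
  · have hx2 : 2 ≤ x := by omega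
    have hN : ((x.toNat : Int)) = x := Int.toNat_of_nonneg (by omega)
    rw [if_neg hx, primeLoopB_iff x 2 (by omega)]
    constructor
    · intro h
      refine ⟨hx2, ?_⟩
      by_contra hnp
      have hq := Nat.minFac_prime (n := x.toNat) (by omega)
      have hqsq : x.toNat.minFac ^ 2 ≤ x.toNat := Nat.minFac_sq_le_self (by omega) hnp
      refine h (x.toNat.minFac : Int) ?_ ?_ ?_
      · exact_mod_cast hq.two_le
      · have : ((x.toNat.minFac * x.toNat.minFac : Nat) : Int) ≤ (x.toNat : Int) := by
          exact_mod_cast (by rw [← pow_two]; exact hqsq : x.toNat.minFac * x.toNat.minFac ≤ x.toNat)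
        push_cast at this
        omega
      · rw [← hN]
        exact_mod_cast Int.natCast_dvd_natCast.mpr (Nat.minFac_dvd _)
    · rintro ⟨-, hp⟩ f hf2 hfx hdvd
      have hfN : f.toNat ∣ x.toNat := by
        rw [← Int.natCast_dvd_natCast, hN, Int.toNat_of_nonneg (by omega)]
        exact hdvd
      have hflt : f.toNat < x.toNat := by
        have h2f : 2 * f ≤ f * f := by
          apply mul_le_mul hf2 le_rfl (by omega) (by omega)
        omega
      exact Nat.prime_def_lt'.mp hp |>.2 f.toNat (by omega) hflt hfN

-- B's smallest-factor loop on a prime n never fires and returns n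
theorem sfLoopB_of_prime (n : Int) (hn : 2 ≤ n) (hp : Nat.Prime n.toNat) :
    ∀ f : Int, 2 ≤ f → sfLoopB n f = n := by
  intro f
  have hN : ((n.toNat : Int)) = n := Int.toNat_of_nonneg (by omega)
  induction f using sfLoopB.induct (n := n) with
  | case1 f hguard hmod =>
    intro hf2
    rw [beq_iff_eq, PySem.Int.mod_eq_zero_iff_dvd] at hmod
    have hfN : f.toNat ∣ n.toNat := by
      rw [← Int.natCast_dvd_natCast, hN, Int.toNat_of_nonneg (by omega)]
      exact hmod
    rcases (Nat.dvd_prime hp).mp hfN with h1 | h1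
    · omega
    · have hfn : f = n := by omega
      subst hfn
      nlinarith
  | case2 f hguard hmod ih =>
    intro hf2
    rw [sfLoopB, if_pos hguard, if_neg hmod]
    exact ih (by omega)
  | case3 f hguard =>
    intro _
    rw [sfLoopB, if_neg hguard]

-- B's smallest-factor loop on a composite n computes Nat.minFac
theorem sfLoopB_of_composite (n : Int) (hn : 2 ≤ n) (hp : ¬ Nat.Prime n.toNat) :
    ∀ f : Int, 2 ≤ f → f ≤ (n.toNat.minFac : Int) → sfLoopB n f = (n.toNat.minFac : Int) := by
  intro f
  have hN : ((n.toNat : Int)) = n := Int.toNat_of_nonneg (by omega)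
  have hq := Nat.minFac_prime (n := n.toNat) (by omega)
  have hqd := Nat.minFac_dvd n.toNat
  have hqsq : n.toNat.minFac * n.toNat.minFac ≤ n.toNat := by
    have := Nat.minFac_sq_le_self (n := n.toNat) (by omega) hp
    rwa [pow_two] at this
  induction f using sfLoopB.induct (n := n) with
  | case1 f hguard hmod =>
    intro hf2 hfq
    rw [sfLoopB, if_pos hguard, if_pos hmod]
    rw [beq_iff_eq, PySem.Int.mod_eq_zero_iff_dvd] at hmod
    have hfN : f.toNat ∣ n.toNat := by
      rw [← Int.natCast_dvd_natCast, hN, Int.toNat_of_nonneg (by omega)]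
      exact hmod
    have := Nat.minFac_le_of_dvd (by omega) hfN
    omega
  | case2 f hguard hmod ih =>
    intro hf2 hfq
    rw [sfLoopB, if_pos hguard, if_neg hmod]
    have hfne : f ≠ (n.toNat.minFac : Int) := by
      intro he
      apply hmod
      rw [beq_iff_eq, PySem.Int.mod_eq_zero_iff_dvd, he, ← hN]
      exact_mod_cast Int.natCast_dvd_natCast.mpr hqd
    exact ih (by omega) (by omega)
  | case3 f hguard =>
    intro hf2 hfq
    exfalso
    apply hguard
    have h1 : f * f ≤ (n.toNat.minFac : Int) * (n.toNat.minFac : Int) :=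
      mul_le_mul hfq hfq (by omega) (by positivity)
    have h2 : ((n.toNat.minFac : Int)) * (n.toNat.minFac : Int) ≤ n := by
      rw [← hN]; exact_mod_cast hqsq
    omega

-- B's multiplicity loop: m = p^k * m' with p not dividing m'
theorem powCountB_spec (p : Int) (hp : 2 ≤ p) :
    ∀ (fuel : Nat) (m : Int), 1 ≤ m → m.toNat ≤ fuel →
    ∃ (m' : Int) (k : Nat), powCountB p fuel m = (m', (k : Int)) ∧
      m = p ^ k * m' ∧ 1 ≤ m' ∧ ¬ p ∣ m' := by
  intro fuel
  induction fuel with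
  | zero => intro m hm hf; omega
  | succ fuel ih =>
    intro m hm hf
    by_cases hg : (PySem.Int.mod m p == 0 && decide (m > 1)) = true
    · have hdvd : p ∣ m := by
        have := (Bool.and_eq_true _ _).mp hg |>.1
        rwa [beq_iff_eq, PySem.Int.mod_eq_zero_iff_dvd] at this
      have hm1 : 1 < m := by
        have := (Bool.and_eq_true _ _).mp hg |>.2
        simpa using this
      obtain ⟨c, hc⟩ := hdvd
      have hfd : PySem.Int.floordiv m p = c := by
        rw [hc, PySem.Int.floordiv_eq_ediv_of_pos (by omega), Int.mul_ediv_cancel_left _ (by omega)]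
      have hc1 : 1 ≤ c := by nlinarith
      have h2c : 2 * c ≤ m := by nlinarith
      have hcf : c.toNat ≤ fuel := by omega
      obtain ⟨m', k, heq, hmk, hm'1, hnd⟩ := ih c hc1 hcf
      refine ⟨m', k + 1, ?_, ?_, hm'1, hnd⟩
      · rw [powCountB, if_pos hg, hfd, heq]
        simp only [Prod.mk.injEq, true_and]
        push_cast
        ring
      · rw [hc, hmk, pow_succ]; ring
    · refine ⟨m, 0, ?_, by ring_nf, hm, ?_⟩
      · rw [powCountB, if_neg hg]
        norm_num
      · intro hdvd
        rcases (by omega : m = 1 ∨ 1 < m) with h1 | h1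
        · subst h1
          rcases Int.isUnit_iff.mp (isUnit_of_dvd_one hdvd) with h | h <;> omega
        · apply hg
          rw [Bool.and_eq_true, beq_iff_eq, PySem.Int.mod_eq_zero_iff_dvd]
          exact ⟨hdvd, by simpa using h1⟩

-- first-some of a list all of whose hits are the same value
theorem findSome?_eq_some_of_unique {α β : Type} (l : List α) (f : α → Option β) (v : β)
    (h1 : ∀ x ∈ l, f x = none ∨ f x = some v) (h2 : ∃ x ∈ l, f x = some v) :
    l.findSome? f = some v := by
  induction l with
  | nil => rcases h2 with ⟨x, hx, -⟩; cases hx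
  | cons a l ih =>
    rcases h1 a (List.mem_cons_self) with ha | ha
    · rw [List.findSome?_cons, ha]
      apply ih (fun x hx => h1 x (List.mem_cons_of_mem _ hx))
      rcases h2 with ⟨x, hx, hfx⟩
      rcases List.mem_cons.mp hx with rfl | hx'
      · rw [ha] at hfx; cases hfx
      · exact ⟨x, hx', hfx⟩
    · rw [List.findSome?_cons, ha]

-- any hit of A's inner test, for a composite n = p^k * m' (p = minFac, p ∤ m'), pins
-- down c = p, d = k, m' = 1 and k prime
theorem sol_char (n : Int) (hn : 2 ≤ n) (m' : Int) (k : Nat)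
    (hmk : n = ((n.toNat.minFac : Int)) ^ k * m') (hm'1 : 1 ≤ m')
    (hnd : ¬ ((n.toNat.minFac : Int)) ∣ m') (c d : Int)
    (hP : (c ^ d.toNat == n && isPrimeA c && isPrimeA d) = true) :
    c = (n.toNat.minFac : Int) ∧ d = (k : Int) ∧ m' = 1 ∧ Nat.Prime k := by
  have hN : ((n.toNat : Int)) = n := Int.toNat_of_nonneg (by omega)
  have hq := Nat.minFac_prime (n := n.toNat) (by omega)
  have hqd := Nat.minFac_dvd n.toNat
  simp only [Bool.and_eq_true, beq_iff_eq] at hP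
  obtain ⟨⟨hpow, hcA⟩, hdA⟩ := hP
  obtain ⟨hc2, hcp⟩ := (isPrimeA_iff c).mp hcA
  obtain ⟨hd2, hdp⟩ := (isPrimeA_iff d).mp hdA
  have hC : ((c.toNat : Int)) = c := Int.toNat_of_nonneg (by omega)
  have hM' : ((m'.toNat : Int)) = m' := Int.toNat_of_nonneg (by omega)
  -- pass the power equation to Nat
  have hpowN : c.toNat ^ d.toNat = n.toNat := by
    have : ((c.toNat ^ d.toNat : Nat) : Int) = ((n.toNat : Nat) : Int) := by
      push_cast
      rw [hC, hN]
      exact hpow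
    exact_mod_cast this
  have hmkN : n.toNat = n.toNat.minFac ^ k * m'.toNat := by
    have : ((n.toNat : Nat) : Int) = ((n.toNat.minFac ^ k * m'.toNat : Nat) : Int) := by
      push_cast
      rw [hM', hN]
      exact hmk
    exact_mod_cast this
  have hndN : ¬ n.toNat.minFac ∣ m'.toNat := by
    intro h
    apply hnd
    rw [← hM']
    exact_mod_cast Int.natCast_dvd_natCast.mpr h
  -- q divides n = C^D, hence q = C
  have hqC : n.toNat.minFac = c.toNat := by
    have hqn : n.toNat.minFac ∣ c.toNat ^ d.toNat := hpowN ▸ hqd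
    exact (Nat.prime_dvd_prime_iff_eq hq hcp).mp (hq.dvd_of_dvd_pow hqn)
  -- so N = q^D = q^k * M', giving D = k and M' = 1
  have hqD : n.toNat.minFac ^ d.toNat = n.toNat.minFac ^ k * m'.toNat := by
    conv_lhs => rw [hqC, hpowN]
    exact hmkN
  have hkD : k ≤ d.toNat := by
    have hdvd : n.toNat.minFac ^ k ∣ n.toNat.minFac ^ d.toNat := ⟨m'.toNat, hqD⟩
    exact (Nat.pow_dvd_pow_iff_le_right hq.one_lt).mp hdvd
  have hMeq : m'.toNat = n.toNat.minFac ^ (d.toNat - k) := by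
    have h0 : 0 < n.toNat.minFac ^ k := Nat.pow_pos hq.pos
    apply Nat.eq_of_mul_eq_mul_left h0
    rw [← hqD, ← pow_add, Nat.add_sub_cancel' hkD]
  have hDk : d.toNat = k := by
    by_contra hne
    apply hndN
    rw [hMeq]
    exact dvd_pow_self _ (by omega)
  have hm'one : m' = 1 := by
    have : m'.toNat = 1 := by rw [hMeq, hDk, Nat.sub_self, pow_zero]
    omega
  refine ⟨by rw [← hC, ← hqC], by omega, hm'one, ?_⟩
  rw [← hDk]
  exact hdp

-- ===== VERDICT (by name: the statement is the Claim_ definition above) =====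
theorem ret_arr_spec : Claim_equal_ret_arr := by
  unfold Claim_equal_ret_arr Spec_ret_arr
  intro n _
  by_cases hn2 : n < 2
  · -- n < 2: A's prime test fails and its search ranges are empty; B returns none
    have hA : ¬ isPrimeA n = true := by
      rw [isPrimeA_iff]; rintro ⟨h, -⟩; omega
    unfold ret_arr ret_arr_alt
    rw [if_neg hA, if_pos hn2, List.findSome?_eq_none_iff]
    intro c hc
    rw [PySem.List.mem_pyRange_one] at hc
    exact absurd hc (by omega)
  · have hn2' : 2 ≤ n := by omega
    have hN : ((n.toNat : Int)) = n := Int.toNat_of_nonneg (by omega)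
    by_cases hp : Nat.Prime n.toNat
    · -- n prime: both return [n, 1]
      have hA : isPrimeA n = true := (isPrimeA_iff n).mpr ⟨hn2', hp⟩
      unfold ret_arr ret_arr_alt
      rw [if_pos hA, if_neg hn2, sfLoopB_of_prime n hn2' hp 2 le_rfl]
      simp
    · -- n composite
      have hA : ¬ isPrimeA n = true := by
        rw [isPrimeA_iff]
        rintro ⟨-, h⟩
        exact hp h
      have hq := Nat.minFac_prime (n := n.toNat) (by omega)
      have hqd := Nat.minFac_dvd n.toNat
      have hqne : ((n.toNat.minFac : Int)) ≠ n := by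
        intro he
        apply hp
        have : n.toNat.minFac = n.toNat := by omega
        rwa [← this]
      have hsf : sfLoopB n 2 = (n.toNat.minFac : Int) :=
        sfLoopB_of_composite n hn2' hp 2 le_rfl (by exact_mod_cast hq.two_le)
      obtain ⟨m', k, hpc, hmk, hm'1, hnd⟩ :=
        powCountB_spec (n.toNat.minFac : Int) (by exact_mod_cast hq.two_le) n.natAbs n
          (by omega) (by omega)
      unfold ret_arr ret_arr_alt
      rw [if_neg hA, if_neg hn2]
      simp only [hsf, beq_eq_false_iff_ne.mpr hqne, Bool.false_eq_true, if_false, hpc]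
      by_cases hcond : (m' == 1 && isPrimeB (k : Int)) = true
      · -- n = p^k with k prime: A's search first hits exactly (p, k)
        simp only [Bool.and_eq_true, beq_iff_eq] at hcond
        obtain ⟨hm'one, hkB⟩ := hcond
        obtain ⟨hk2, hkp'⟩ := (isPrimeB_iff _).mp hkB
        have hkp : Nat.Prime k := by simpa using hkp'
        have hk2' : 2 ≤ k := hkp.two_le
        subst hm'one
        have hnq : n = ((n.toNat.minFac : Int)) ^ k := by
          conv_lhs => rw [hmk, mul_one]
        have hqlen : (n.toNat.minFac : Int) ≤ n := by
          rw [← hN]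
          exact_mod_cast Nat.minFac_le (by omega)
        have hklen : (k : Int) ≤ n := by
          have h1 : k < 2 ^ k := Nat.lt_two_pow_self
          have h3 : ((n.toNat.minFac ^ k : Nat) : Int) = n := by push_cast; exact hnq.symm
          rw [← h3]
          exact_mod_cast le_of_lt (lt_of_lt_of_le h1 (Nat.pow_le_pow_left hq.two_le k))
        rw [if_pos (by simp [hkB])]
        apply findSome?_eq_some_of_unique
        · intro c hc
          cases hinner : (PySem.List.pyRange 1 (n + 1) 1).findSome? (fun d =>
              if c ^ d.toNat == n && isPrimeA c && isPrimeA d then some [c, d] else none) with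
          | none => exact Or.inl rfl
          | some w =>
            refine Or.inr ?_
            obtain ⟨d, hdmem, hdeq⟩ := List.exists_of_findSome?_eq_some hinner
            rw [PySem.List.mem_pyRange_one] at hdmem
            split_ifs at hdeq with hP
            · obtain ⟨hc', hd', -, -⟩ :=
                sol_char n hn2' 1 k hmk le_rfl hnd c d hP
              cases hdeq
              rw [hc', hd']
        · refine ⟨(n.toNat.minFac : Int), ?_, ?_⟩
          · rw [PySem.List.mem_pyRange_one]
            constructor
            · exact_mod_cast hq.two_le
            · omega
          · apply findSome?_eq_some_of_unique
            · intro d hd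
              rw [PySem.List.mem_pyRange_one] at hd
              split_ifs with hP
              · obtain ⟨-, hd', -, -⟩ :=
                  sol_char n hn2' 1 k hmk le_rfl hnd _ d hP
                exact Or.inr (by rw [hd'])
              · exact Or.inl rfl
            · refine ⟨(k : Int), ?_, ?_⟩
              · rw [PySem.List.mem_pyRange_one]
                omega
              · rw [if_pos]
                simp only [Bool.and_eq_true, beq_iff_eq]
                refine ⟨⟨?_, ?_⟩, ?_⟩
                · simp only [Int.toNat_natCast]
                  exact hnq.symm
                · exact (isPrimeA_iff _).mpr ⟨by exact_mod_cast hq.two_le, by simpa using hq⟩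
                · exact (isPrimeA_iff _).mpr ⟨by omega, by simpa using hkp⟩
      · -- no (c, d) with c^d = n, c and d prime, exists: both return none
        rw [if_neg hcond]
        rw [List.findSome?_eq_none_iff]
        intro c hc
        rw [List.findSome?_eq_none_iff]
        intro d hd
        rw [PySem.List.mem_pyRange_one] at hd
        rw [if_neg]
        intro hP
        obtain ⟨hc', hd', hm'one, hkp⟩ := sol_char n hn2' m' k hmk hm'1 hnd c d hP
        apply hcond
        rw [Bool.and_eq_true, beq_iff_eq]
        refine ⟨hm'one, (isPrimeB_iff _).mpr ⟨by exact_mod_cast hkp.two_le, by simpa using hkp⟩⟩
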